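-- pv_equiv track=rewrite | github.com/zippo1986/sanchezAlbertti_A112_primerparcial_labo1 | funciones_secundarias.py | calcular_maximo_dos
-- ===== SOURCE A (Python) =====
-- def calcular_maximo_dos(lista, atributo):
--     """Calcula los  maximos de determinado atributo dentro de una lista de diccionarios
--
--     Args:
--         lista (list):lista de heroes
--         atributo (str): la clave del diccionario de la que se quiere sacar el maximo
--
--     Returns:
--         list: retorna una lista de diccionarios que contiene los heroes del maximo en determinado atributo
--     """
--     bandera = True
--     numero_maximo = None
--     pelicula_max_rating = []
--     for i in lista:
--         if  (bandera ==True)or(int(i[atributo]) >(numero_maximo)) :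
--
--             numero_maximo =int(i[atributo])
--             bandera= False
--
--     for i in lista:
--         if int(i[atributo])== numero_maximo:
--             pelicula_max_rating.append(i)
--     return pelicula_max_rating
-- ===== SOURCE B (Python) =====
-- def calcular_maximo_dos(lista, atributo):
--     """Single pass: keep the running maximum and the list of dicts achieving it."""
--     numero_maximo = None
--     pelicula_max_rating = []
--     for i in lista:
--         v = int(i[atributo])
--         if numero_maximo is None or v > numero_maximo:
--             numero_maximo = v
--             pelicula_max_rating = [i]
--         elif v == numero_maximo:
--             pelicula_max_rating.append(i)
--     return pelicula_max_rating
-- ===== Notes on version B (the rewrite author's own statement) =====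
-- stated objective: alternative
-- what changed: Replaces A's two sequential passes (one to find the maximum, one to collect the dicts matching it) by a single loop that maintains the running maximum and the list of dicts achieving it, resetting on a strictly greater value and appending on ties; int() is called once per element instead of twice.
import Mathlib
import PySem

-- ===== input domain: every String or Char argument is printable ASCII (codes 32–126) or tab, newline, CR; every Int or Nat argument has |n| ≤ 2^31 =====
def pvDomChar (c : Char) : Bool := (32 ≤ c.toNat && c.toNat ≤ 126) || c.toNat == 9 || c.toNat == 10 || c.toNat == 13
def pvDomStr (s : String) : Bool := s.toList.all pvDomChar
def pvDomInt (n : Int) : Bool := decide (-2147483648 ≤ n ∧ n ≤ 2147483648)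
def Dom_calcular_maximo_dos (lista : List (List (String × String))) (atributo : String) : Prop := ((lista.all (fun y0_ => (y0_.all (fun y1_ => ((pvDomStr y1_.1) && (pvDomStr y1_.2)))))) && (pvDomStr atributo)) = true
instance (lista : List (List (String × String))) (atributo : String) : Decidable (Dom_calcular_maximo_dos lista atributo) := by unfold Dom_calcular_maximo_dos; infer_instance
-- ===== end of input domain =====

-- B merges A's two passes into a single loop keeping the running maximum and its dicts (objective: alternative single-pass decomposition).
-- int(i[atributo]) : first-match lookup in the association list, then Python int();
-- inside Pre_ the lookup and parse always succeed (the `.getD 0` default is never reached).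
def pvVal (i : List (String × String)) (atributo : String) : Int :=
  ((List.lookup atributo i).bind PySem.Int.ofStr?).getD 0

-- ===== PORT A =====
-- first loop of A: state (bandera, numero_maximo); None is represented by the value
-- paired with bandera = true (Python never compares against None thanks to `or` short-circuit)
def pvLoop1 (atributo : String) : List (List (String × String)) → Bool → Int → Bool × Int
  | [], bandera, nm => (bandera, nm)
  | i :: rest, bandera, nm =>
    if bandera = true ∨ pvVal i atributo > nm then
      pvLoop1 atributo rest false (pvVal i atributo)
    else
      pvLoop1 atributo rest bandera nm

-- second loop of A: append i when int(i[atributo]) == numero_maximo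
def pvLoop2 (atributo : String) (nm : Bool × Int) : List (List (String × String)) → List (List (String × String)) → List (List (String × String))
  | [], acc => acc
  | i :: rest, acc =>
    if nm.1 = false ∧ pvVal i atributo = nm.2 then
      pvLoop2 atributo nm rest (acc ++ [i])
    else
      pvLoop2 atributo nm rest acc

def calcular_maximo_dos (lista : List (List (String × String))) (atributo : String) : List (List (String × String)) :=
  pvLoop2 atributo (pvLoop1 atributo lista true 0) lista []

-- ===== PORT B =====
-- single pass: running maximum (Option Int, None at the start) and the dicts achieving it
def pvLoopB (atributo : String) : List (List (String × String)) → Option Int → List (List (String × String)) → List (List (String × String))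
  | [], _, acc => acc
  | i :: rest, nm, acc =>
    let v := pvVal i atributo
    match nm with
    | none => pvLoopB atributo rest (some v) [i]
    | some m =>
      if v > m then pvLoopB atributo rest (some v) [i]
      else if v = m then pvLoopB atributo rest (some m) (acc ++ [i])
      else pvLoopB atributo rest (some m) acc

def calcular_maximo_dos_alt (lista : List (List (String × String))) (atributo : String) : List (List (String × String)) :=
  pvLoopB atributo lista none []

-- ===== PRECONDITION & SPEC =====
-- Pre_: every dict has a value at key atributo that int() parses (otherwise A raises KeyError/ValueError)
def Pre_calcular_maximo_dos (lista : List (List (String × String))) (atributo : String) : Prop :=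
  ∀ i ∈ lista, ((List.lookup atributo i).bind PySem.Int.ofStr?).isSome = true
instance (lista : List (List (String × String))) (atributo : String) : Decidable (Pre_calcular_maximo_dos lista atributo) := by unfold Pre_calcular_maximo_dos; infer_instance
def pvWitness_calcular_maximo_dos : (List (List (String × String))) × String :=
  ([[("rating", "7"), ("nombre", "a")], [("rating", "7")], [("rating", "3")]], "rating")

def Spec_calcular_maximo_dos (lista : List (List (String × String))) (atributo : String) (out : List (List (String × String))) : Prop := out = calcular_maximo_dos_alt lista atributo
instance (lista : List (List (String × String))) (atributo : String) (out : List (List (String × String))) : Decidable (Spec_calcular_maximo_dos lista atributo out) := by unfold Spec_calcular_maximo_dos; infer_instance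

-- ===== CLAIM (what is proved, stated in full; the proofs are below) =====
def Claim_equal_calcular_maximo_dos : Prop := ∀ (lista : List (List (String × String))) (atributo : String), Dom_calcular_maximo_dos lista atributo → Pre_calcular_maximo_dos lista atributo → Spec_calcular_maximo_dos lista atributo (calcular_maximo_dos lista atributo)

-- ===== LEMMAS AND PROOFS =====

theorem pvFoldMax_le (atributo : String) (l : List (List (String × String))) :
    ∀ m : Int, m ≤ l.foldl (fun c i => max c (pvVal i atributo)) m := by
  induction l with
  | nil => simp
  | cons j r ihr =>
    intro m
    exact le_trans (le_max_left _ _) (ihr (max m (pvVal j atributo)))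

-- A's first loop, once bandera is false, computes the running maximum
theorem pvLoop1_false (atributo : String) (l : List (List (String × String))) (m : Int) :
    pvLoop1 atributo l false m = (false, l.foldl (fun c i => max c (pvVal i atributo)) m) := by
  induction l generalizing m with
  | nil => simp [pvLoop1]
  | cons i rest ih =>
    simp only [pvLoop1, List.foldl_cons]
    by_cases hv : pvVal i atributo > m
    · rw [if_pos (Or.inr hv), ih, max_eq_right (le_of_lt hv)]
    · rw [if_neg (by simp [hv]), ih, max_eq_left (by omega)]

-- A's second loop is a filter (accumulated onto acc)
theorem pvLoop2_eq_filter (atributo : String) (nm : Bool × Int) (l acc : List (List (String × String))) :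
    pvLoop2 atributo nm l acc = acc ++ l.filter (fun i => decide (nm.1 = false ∧ pvVal i atributo = nm.2)) := by
  induction l generalizing acc with
  | nil => simp [pvLoop2]
  | cons i rest ih =>
    simp only [pvLoop2, List.filter_cons]
    by_cases h : nm.1 = false ∧ pvVal i atributo = nm.2
    · rw [if_pos h, ih]; simp [h]
    · rw [if_neg h, ih]; simp [h]

-- B's loop invariant once the running maximum exists
theorem pvLoopB_some (atributo : String) (l : List (List (String × String))) (m : Int) (acc : List (List (String × String))) :
    pvLoopB atributo l (some m) acc =
      (if l.foldl (fun c i => max c (pvVal i atributo)) m = m then acc else []) ++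
        l.filter (fun i => decide (pvVal i atributo = l.foldl (fun c i => max c (pvVal i atributo)) m)) := by
  induction l generalizing m acc with
  | nil => simp [pvLoopB]
  | cons i rest ih =>
    simp only [pvLoopB, List.foldl_cons, List.filter_cons]
    by_cases hgt : pvVal i atributo > m
    · rw [if_pos hgt, ih]
      simp only [max_eq_right (le_of_lt hgt)]
      have hge := pvFoldMax_le atributo rest (pvVal i atributo)
      have hFm : ¬ rest.foldl (fun c i => max c (pvVal i atributo)) (pvVal i atributo) = m := by omega
      rw [if_neg hFm]
      by_cases hF : rest.foldl (fun c i => max c (pvVal i atributo)) (pvVal i atributo) = pvVal i atributo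
      · simp [hF]
      · have hF' : ¬ pvVal i atributo = rest.foldl (fun c i => max c (pvVal i atributo)) (pvVal i atributo) :=
          fun h => hF h.symm
        simp [hF, hF']
    · rw [if_neg hgt]
      have hm : max m (pvVal i atributo) = m := by omega
      simp only [hm]
      by_cases heq : pvVal i atributo = m
      · rw [if_pos heq, ih]
        have hge := pvFoldMax_le atributo rest m
        by_cases hE : rest.foldl (fun c i => max c (pvVal i atributo)) m = m
        · have hv : pvVal i atributo = rest.foldl (fun c i => max c (pvVal i atributo)) m := by omega
          simp [hE, hv]
        · have hv : ¬ pvVal i atributo = rest.foldl (fun c i => max c (pvVal i atributo)) m := by omega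
          simp [hE, hv]
      · rw [if_neg heq, ih]
        have hge := pvFoldMax_le atributo rest m
        have hv : ¬ pvVal i atributo = rest.foldl (fun c i => max c (pvVal i atributo)) m := by omega
        simp [hv]

-- ===== VERDICT (by name: the statement is the Claim_ definition above) =====
theorem calcular_maximo_dos_spec : Claim_equal_calcular_maximo_dos := by
  intro lista atributo _ _
  unfold Spec_calcular_maximo_dos calcular_maximo_dos calcular_maximo_dos_alt
  cases lista with
  | nil => simp [pvLoop2, pvLoopB]
  | cons i rest =>
    simp only [pvLoop1, pvLoopB]
    rw [if_pos (Or.inl trivial), pvLoop1_false, pvLoop2_eq_filter, pvLoopB_some]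
    simp only [List.nil_append, List.filter_cons]
    by_cases hE : rest.foldl (fun c i => max c (pvVal i atributo)) (pvVal i atributo) = pvVal i atributo
    · simp [hE]
    · have hne : ¬ pvVal i atributo = rest.foldl (fun c i => max c (pvVal i atributo)) (pvVal i atributo) :=
        fun h => hE h.symm
      simp [hE, hne]
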